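-- pv_equiv track=rewrite | github.com/TrinhVinh2003/Vimo-Assistance | app/data_loader/xlsx_parser.py | read_xlsx_file
-- ===== SOURCE A (Python) =====
-- from typing import List
--
-- def read_xlsx_file(response_data: dict) -> List[str]:
--     """Convert file to html table format."""
--     sections = response_data.get("sections", [])
--     section = []
--     tables = []
--     current_table_rows = []
--     current_caption = None
--
--     for row in sections:
--         if row and isinstance(row, list) and row[0]:
--             # Lấy nội dung của hàng, tách theo dấu ";" và loại bỏ tiền tố "None："
--             content = row[0]
--             cells = [cell.replace("None：", "").strip() for cell in content.split(";")]
--             # Nếu dòng có 1 ô hoặc các ô sau ô đầu đều rỗng -> coi là dòng caption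
--             if len(cells) == 1 or all(cell == "" for cell in cells[1:]):
--                 # Nếu đã có dữ liệu của một bảng trước đó thì xuất bảng hiện hành
--                 if current_table_rows:
--                     table_html = "<table>\n"
--                     if current_caption:
--                         table_html += f"<caption>{current_caption}</caption>\n"
--                     for table_row in current_table_rows:
--                         table_html += (
--                             "<tr>"
--                             + "".join(f"<td>{cell}</td>" for cell in table_row)
--                             + "</tr>\n"
--                         )
--                     table_html += "</table>"
--                     tables.append(table_html)
--                     current_table_rows = []
--                 # Cập nhật caption mới cho bảng hiện hành
--                 current_caption = cells[0]
--             else: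
--                 # Dòng bình thường, thêm vào bảng hiện hành
--                 current_table_rows.append(cells)
--
--     # Xuất bảng cuối nếu còn dữ liệu
--     if current_table_rows:
--         table_html = "<table>\n"
--         if current_caption:
--             table_html += f"<caption>{current_caption}</caption>\n"
--         for table_row in current_table_rows:
--             table_html += (
--                 "<tr>" + "".join(f"<td>{cell}</td>" for cell in table_row) + "</tr>\n"
--             )
--         table_html += "</table>"
--         tables.append(table_html)
--
--     return section, tables
-- ===== SOURCE B (Python) =====
-- from typing import List
--
--
-- def _parse(row):
--     """Tokenize one section row: ('cap', text), ('row', cells) or None (ignored)."""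
--     if not (row and isinstance(row, list) and row[0]):
--         return None
--     cells = [cell.replace("None：", "").strip() for cell in row[0].split(";")]
--     if len(cells) == 1 or all(cell == "" for cell in cells[1:]):
--         return ("cap", cells[0])
--     return ("row", cells)
--
--
-- def _runs(tokens):
--     """Chunk the token stream into maximal runs of tokens of equal kind."""
--     runs = []
--     i = 0
--     while i < len(tokens):
--         j = i + 1
--         while j < len(tokens) and tokens[j][0] == tokens[i][0]:
--             j += 1
--         runs.append(tokens[i:j])
--         i = j
--     return runs
--
--
-- def _render(caption, rows):
--     """Render one table from its caption and its data rows."""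
--     parts = ["<table>"]
--     if caption:
--         parts.append(f"<caption>{caption}</caption>")
--     parts.extend(
--         "<tr>" + "".join(f"<td>{c}</td>" for c in row) + "</tr>" for row in rows
--     )
--     return "\n".join(parts) + "\n</table>"
--
--
-- def read_xlsx_file(response_data: dict) -> List[str]:
--     """Convert file to html table format."""
--     # Stage 1: tokenize every section row; stage 2: chunk into homogeneous runs;
--     # stage 3: each row-run is one table, captioned by the last preceding caption.
--     tokens = [t for t in map(_parse, response_data.get("sections", [])) if t is not None]
--     tables = []
--     caption = None
--     for run in _runs(tokens):
--         if run[0][0] == "cap":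
--             caption = run[-1][1]
--         else:
--             tables.append(_render(caption, [v for _, v in run]))
--     return [], tables
-- ===== Notes on version B (the rewrite author's own statement) =====
-- stated objective: alternative
-- what changed: B replaces A's single stateful accumulate-and-flush scan with a staged pipeline: tokenize every section row into caption/data tokens, chunk the token stream into maximal runs of equal kind, then emit one table per data run (captioned by the last token of the preceding caption run), with a join-based render helper.
import Mathlib
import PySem

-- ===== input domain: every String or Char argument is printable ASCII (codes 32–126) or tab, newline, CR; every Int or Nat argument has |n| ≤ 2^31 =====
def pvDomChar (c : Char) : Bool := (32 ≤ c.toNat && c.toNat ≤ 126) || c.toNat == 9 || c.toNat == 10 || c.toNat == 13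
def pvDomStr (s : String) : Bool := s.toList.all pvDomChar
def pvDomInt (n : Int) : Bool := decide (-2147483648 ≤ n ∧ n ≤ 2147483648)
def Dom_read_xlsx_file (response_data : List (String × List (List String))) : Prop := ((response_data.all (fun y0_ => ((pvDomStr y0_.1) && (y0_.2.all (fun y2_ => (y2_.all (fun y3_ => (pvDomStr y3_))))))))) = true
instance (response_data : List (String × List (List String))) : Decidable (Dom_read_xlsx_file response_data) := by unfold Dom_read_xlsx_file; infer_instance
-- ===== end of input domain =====

-- B replaces A's stateful accumulate-and-flush scan with a staged pipeline
-- (tokenize rows, chunk the token stream into maximal same-kind runs, render one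
-- table per data run); same return value, no mutation involved.

-- ===== PORT A =====
-- shared cell parsing: cells = [cell.replace("None：", "").strip() for cell in content.split(";")]
def pvCells (content : String) : List String :=
  ((PySem.Str.split? content ";").getD []).map
    (fun cell => PySem.Str.strip (PySem.Str.replace cell "None：" ""))

-- A's inline table emission: "<table>\n" [+ caption line] + each "<tr>…</tr>\n" + "</table>"
def pvTableHtmlA (caption : Option String) (rows : List (List String)) : String :=
  let h1 := "<table>\n"
  let h2 := match caption with
    | some c => if c ≠ "" then h1 ++ ("<caption>" ++ c ++ "</caption>\n") else h1
    | none => h1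
  let h3 := rows.foldl (fun acc r =>
      acc ++ ("<tr>" ++ PySem.Str.join "" (r.map (fun cell => "<td>" ++ cell ++ "</td>")) ++ "</tr>\n")) h2
  h3 ++ "</table>"

-- one iteration of A's for-loop; state = (tables, current_table_rows, current_caption)
def pvStepA (st : List String × List (List String) × Option String) (row : List String) :
    List String × List (List String) × Option String :=
  match row with
  | [] => st                        -- `if row` falsy: skip
  | c0 :: _ =>
    if c0 = "" then st              -- `row[0]` falsy: skip
    else
      let cells := pvCells c0
      if cells.length == 1 || (cells.drop 1).all (· == "") then
        if st.2.1 ≠ [] then (st.1 ++ [pvTableHtmlA st.2.2 st.2.1], [], some (cells.headD ""))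
        else (st.1, st.2.1, some (cells.headD ""))
      else (st.1, st.2.1 ++ [cells], st.2.2)

def read_xlsx_file (response_data : List (String × List (List String))) : List String × List String :=
  let sections := (PySem.Dict.mk response_data).getD "sections" []
  let st := sections.foldl pvStepA ([], [], none)
  let tables := if st.2.1 ≠ [] then st.1 ++ [pvTableHtmlA st.2.2 st.2.1] else st.1
  ([], tables)

-- ===== PORT B =====
-- Source B's _parse: one section row → a token: Sum.inl caption-text | Sum.inr cells | none
def pvParse (row : List String) : Option (Sum String (List String)) :=
  match row with
  | [] => none
  | c0 :: _ =>
    if c0 = "" then none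
    else
      let cells := pvCells c0
      if cells.length == 1 || (cells.drop 1).all (· == "") then
        some (Sum.inl (cells.headD ""))
      else some (Sum.inr cells)

-- Source B's _runs: chunk the token stream into maximal runs of tokens of equal kind
def pvRuns : List (Sum String (List String)) → List (List (Sum String (List String)))
  | [] => []
  | t :: ts =>
    (t :: ts.takeWhile (fun u => u.isLeft == t.isLeft)) ::
      pvRuns (ts.dropWhile (fun u => u.isLeft == t.isLeft))
termination_by ts => ts.length
decreasing_by
  have := List.length_dropWhile_le (fun u => u.isLeft == t.isLeft) ts
  simp only [List.length_cons]
  omega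

-- Source B's _render: "\n".join(["<table>"] [+ caption line] + row lines) + "\n</table>"
def pvRenderB (caption : Option String) (rows : List (List String)) : String :=
  let parts := ["<table>"]
    ++ (match caption with
        | some c => if c ≠ "" then ["<caption>" ++ c ++ "</caption>"] else []
        | none => [])
    ++ rows.map (fun r => "<tr>" ++ PySem.Str.join "" (r.map (fun cell => "<td>" ++ cell ++ "</td>")) ++ "</tr>")
  PySem.Str.join "\n" parts ++ "\n</table>"

-- Source B's loop body over runs; state = (tables, caption)
def pvRunStep (st : List String × Option String) (run : List (Sum String (List String))) :
    List String × Option String :=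
  if (run.headD (Sum.inr [])).isLeft then
    (st.1, match run.getLast? with | some (Sum.inl s) => some s | _ => st.2)
  else
    (st.1 ++ [pvRenderB st.2 (run.filterMap (fun t => match t with | Sum.inr v => some v | _ => none))], st.2)

def read_xlsx_file_alt (response_data : List (String × List (List String))) : List String × List String :=
  let sections := (PySem.Dict.mk response_data).getD "sections" []
  let tokens := sections.filterMap pvParse
  let st := (pvRuns tokens).foldl pvRunStep ([], none)
  ([], st.1)

-- ===== PRECONDITION & SPEC =====
def Spec_read_xlsx_file (response_data : List (String × List (List String))) (out : List String × List String) : Prop := out = read_xlsx_file_alt response_data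
instance (response_data : List (String × List (List String))) (out : List String × List String) : Decidable (Spec_read_xlsx_file response_data out) := by unfold Spec_read_xlsx_file; infer_instance

-- ===== CLAIM (what is proved, stated in full; the proofs are below) =====
def Claim_equal_read_xlsx_file : Prop := ∀ (response_data : List (String × List (List String))), Dom_read_xlsx_file response_data → Spec_read_xlsx_file response_data (read_xlsx_file response_data)

-- ===== LEMMAS AND PROOFS =====

-- ---- renderers agree ----
def pvCat (xs : List String) : String := xs.foldr (· ++ ·) ""

lemma pvJoin_singleton (x : String) : PySem.Str.join "\n" [x] = x := by
  apply String.toList_inj.mp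
  simp [PySem.Str.toList_join, PySem.Chars.join_singleton]

lemma pvJoin_cons (x y : String) (ls : List String) :
    PySem.Str.join "\n" (x :: y :: ls) = x ++ "\n" ++ PySem.Str.join "\n" (y :: ls) := by
  apply String.toList_inj.mp
  simp [PySem.Str.toList_join, PySem.Chars.join_cons_cons]

lemma pvJoin_newline (x : String) (ls : List String) :
    PySem.Str.join "\n" (x :: ls) ++ "\n" = x ++ "\n" ++ pvCat (ls.map (· ++ "\n"))  := by
  induction ls generalizing x with
  | nil => simp [pvJoin_singleton, pvCat]
  | cons y ls ih =>
      rw [pvJoin_cons]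
      simp only [List.map_cons, pvCat, List.foldr_cons]
      rw [String.append_assoc, ih, String.append_assoc]
      simp [pvCat, String.append_assoc]

lemma pvFoldl_append (f : List String → String) (rows : List (List String)) :
    ∀ init : String,
      rows.foldl (fun acc r => acc ++ f r) init = init ++ pvCat (rows.map f) := by
  induction rows with
  | nil => intro init; simp [pvCat]
  | cons r rows ih =>
      intro init
      simp only [List.foldl_cons, List.map_cons, pvCat, List.foldr_cons, ih, String.append_assoc]

lemma pvRender_eq (caption : Option String) (rows : List (List String)) :
    pvTableHtmlA caption rows = pvRenderB caption rows := by
  unfold pvTableHtmlA pvRenderB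
  have hrows : ∀ init : String,
      rows.foldl (fun acc r =>
        acc ++ ("<tr>" ++ PySem.Str.join "" (r.map (fun cell => "<td>" ++ cell ++ "</td>")) ++ "</tr>\n")) init
      = init ++ pvCat ((rows.map (fun r =>
          "<tr>" ++ PySem.Str.join "" (r.map (fun cell => "<td>" ++ cell ++ "</td>")) ++ "</tr>")).map (· ++ "\n")) := by
    intro init
    rw [pvFoldl_append (fun r =>
        "<tr>" ++ PySem.Str.join "" (r.map (fun cell => "<td>" ++ cell ++ "</td>")) ++ "</tr>\n")]
    rw [List.map_map]
    congr 2
    apply List.map_congr_left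
    intro r _
    simp only [Function.comp]
    conv_rhs => rw [String.append_assoc]
    congr 1
  have hB : ∀ mid : List String,
      PySem.Str.join "\n" ("<table>" :: mid) ++ "\n</table>"
      = "<table>\n" ++ pvCat (mid.map (· ++ "\n")) ++ "</table>" := by
    intro mid
    have h2 : ("\n</table>" : String) = "\n" ++ "</table>" := rfl
    rw [h2, ← String.append_assoc, pvJoin_newline]
    simp [String.append_assoc]
  match caption with
  | none =>
      simp only [List.append_nil, List.singleton_append]
      rw [hrows, hB]
  | some c =>
      by_cases hc : c = ""
      · subst hc
        simp only [ne_eq, not_true_eq_false, if_false, List.append_nil,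
          List.singleton_append]
        rw [hrows, hB]
      · simp only [ne_eq, hc, not_false_eq_true, if_true, List.cons_append,
          List.nil_append]
        rw [hrows, hB ((("<caption>" ++ c ++ "</caption>")) :: _)]
        simp only [List.map_cons, pvCat, List.foldr_cons]
        have h3 : ("<caption>" ++ c ++ "</caption>") ++ "\n" = "<caption>" ++ c ++ "</caption>\n" := by
          rw [String.append_assoc]; congr 1
        rw [h3]
        simp [String.append_assoc, pvCat]

-- ---- A's scan factors through the token stream ----
-- one A-step per token
def pvTokStep (st : List String × List (List String) × Option String)
    (t : Sum String (List String)) : List String × List (List String) × Option String :=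
  match t with
  | Sum.inl s =>
      if st.2.1 ≠ [] then (st.1 ++ [pvTableHtmlA st.2.2 st.2.1], [], some s)
      else (st.1, st.2.1, some s)
  | Sum.inr cells => (st.1, st.2.1 ++ [cells], st.2.2)

def pvFinish (st : List String × List (List String) × Option String) : List String :=
  if st.2.1 ≠ [] then st.1 ++ [pvTableHtmlA st.2.2 st.2.1] else st.1

lemma pvStepA_token (sections : List (List String)) :
    ∀ st, sections.foldl pvStepA st = (sections.filterMap pvParse).foldl pvTokStep st := by
  induction sections with
  | nil => intro st; rfl
  | cons row sections ih =>
      intro st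
      simp only [List.foldl_cons, List.filterMap_cons]
      match row with
      | [] => exact ih st
      | c0 :: rest =>
          by_cases h0 : c0 = ""
          · simp only [pvStepA, pvParse, h0, if_true]
            exact ih st
          · by_cases hc : (pvCells c0).length == 1 || ((pvCells c0).drop 1).all (· == "")
            · simp only [pvStepA, pvParse, h0, ite_false, hc, ite_true,
                List.foldl_cons, pvTokStep]
              exact ih _
            · simp only [pvStepA, pvParse, h0, ite_false, hc,
                List.foldl_cons, pvTokStep]
              exact ih _

-- ---- run-level lemmas ----
lemma pvCapFold (rs : List (Sum String (List String))) :
    ∀ (T : List String) (c : Option String), (∀ x ∈ rs, x.isLeft) →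
      rs.foldl pvTokStep (T, [], c)
      = (T, [], match rs.getLast? with | some (Sum.inl s) => some s | _ => c) := by
  induction rs with
  | nil => intro T c _; rfl
  | cons t rs ih =>
      intro T c hall
      have ht := hall t (by simp)
      match t with
      | Sum.inr _ => simp at ht
      | Sum.inl s =>
          simp only [List.foldl_cons, pvTokStep, ne_eq, not_true_eq_false, ite_false]
          rw [ih T (some s) (fun x hx => hall x (by simp [hx]))]
          cases rs with
          | nil => rfl
          | cons r rs' =>
              have hne : r :: rs' ≠ [] := by simp
              have hlast := hall ((r :: rs').getLast hne)
                (List.mem_cons_of_mem _ (List.getLast_mem hne))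
              obtain ⟨s', hs'⟩ := Sum.isLeft_iff.mp hlast
              rw [List.getLast?_cons_cons, List.getLast?_eq_some_getLast hne, hs']

lemma pvRowFold (rs : List (Sum String (List String))) :
    ∀ (T : List String) (R : List (List String)) (c : Option String),
      (∀ x ∈ rs, x.isRight) →
      rs.foldl pvTokStep (T, R, c)
      = (T, R ++ rs.filterMap (fun t => match t with | Sum.inr v => some v | _ => none), c) := by
  induction rs with
  | nil => intro T R c _; simp
  | cons t rs ih =>
      intro T R c hall
      have ht := hall t (by simp)
      match t with
      | Sum.inl _ => simp at ht
      | Sum.inr v =>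
          simp only [List.foldl_cons, pvTokStep, List.filterMap_cons]
          rw [ih T (R ++ [v]) c (fun x hx => hall x (by simp [hx]))]
          simp

-- flushing may happen eagerly: after a flush, folding the remainder (which is empty
-- or starts with a caption token) gives the same finished table list
lemma pvFlushShift (rest : List (Sum String (List String)))
    (T : List String) (R : List (List String)) (c : Option String)
    (hR : R ≠ [])
    (hrest : rest = [] ∨ ∃ s rest', rest = Sum.inl s :: rest') :
    pvFinish (rest.foldl pvTokStep (T, R, c))
    = pvFinish (rest.foldl pvTokStep (T ++ [pvTableHtmlA c R], [], c)) := by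
  rcases hrest with h | ⟨s, rest', h⟩
  · subst h; simp [pvFinish, hR]
  · subst h
    simp only [List.foldl_cons, pvTokStep, hR, ne_eq, not_false_eq_true, ite_true,
      not_true_eq_false, ite_false]

-- ---- main invariant: token fold + final flush = run fold ----
lemma pvMain : ∀ (n : Nat) (ts : List (Sum String (List String)))
    (T : List String) (c : Option String), ts.length ≤ n →
    pvFinish (ts.foldl pvTokStep (T, [], c))
    = ((pvRuns ts).foldl pvRunStep (T, c)).1 := by
  intro n
  induction n with
  | zero =>
      intro ts T c hlen
      have : ts = [] := List.length_eq_zero_iff.mp (Nat.le_zero.mp hlen)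
      subst this; simp [pvFinish, pvRuns]
  | succ n ih =>
      intro ts T c hlen
      match ts with
      | [] => simp [pvFinish, pvRuns]
      | Sum.inl s :: ts' =>
          -- caption run
          rw [pvRuns]
          have hrest_len :
              (ts'.dropWhile (fun u => u.isLeft == (Sum.inl s : Sum String (List String)).isLeft)).length ≤ n := by
            have := List.length_dropWhile_le
              (fun u : Sum String (List String) => u.isLeft == (Sum.inl s : Sum String (List String)).isLeft) ts'
            simp only [List.length_cons] at hlen
            omega
          have hsplit : Sum.inl s :: ts'
              = (Sum.inl s :: ts'.takeWhile (fun u => u.isLeft == (Sum.inl s : Sum String (List String)).isLeft))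
                ++ ts'.dropWhile (fun u => u.isLeft == (Sum.inl s : Sum String (List String)).isLeft) := by
            simp [List.takeWhile_append_dropWhile]
          rw [hsplit, List.foldl_append]
          have hallL : ∀ x ∈ (Sum.inl s : Sum String (List String))
              :: ts'.takeWhile (fun u => u.isLeft == (Sum.inl s : Sum String (List String)).isLeft), x.isLeft := by
            intro x hx
            rcases hx with _ | hx
            · rfl
            · have h := List.mem_takeWhile_imp (by assumption :
                x ∈ ts'.takeWhile (fun u => u.isLeft == (Sum.inl s : Sum String (List String)).isLeft))
              simpa using h
          rw [pvCapFold _ T c hallL]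
          rw [List.foldl_cons]
          rw [show pvRunStep (T, c) (Sum.inl s
                :: ts'.takeWhile (fun u => u.isLeft == (Sum.inl s : Sum String (List String)).isLeft))
                = (T, match (Sum.inl s
                    :: ts'.takeWhile (fun u => u.isLeft == (Sum.inl s : Sum String (List String)).isLeft)).getLast? with
                      | some (Sum.inl s') => some s' | _ => c) from by
            simp only [pvRunStep]; rfl]
          exact ih _ T _ hrest_len
      | Sum.inr cells :: ts' =>
          -- data-row run
          rw [pvRuns]
          have hrest_len :
              (ts'.dropWhile (fun u => u.isLeft == (Sum.inr cells : Sum String (List String)).isLeft)).length ≤ n := by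
            have := List.length_dropWhile_le
              (fun u : Sum String (List String) => u.isLeft == (Sum.inr cells : Sum String (List String)).isLeft) ts'
            simp only [List.length_cons] at hlen
            omega
          have hsplit : Sum.inr cells :: ts'
              = (Sum.inr cells :: ts'.takeWhile (fun u => u.isLeft == (Sum.inr cells : Sum String (List String)).isLeft))
                ++ ts'.dropWhile (fun u => u.isLeft == (Sum.inr cells : Sum String (List String)).isLeft) := by
            simp [List.takeWhile_append_dropWhile]
          rw [hsplit, List.foldl_append]
          have hallR : ∀ x ∈ (Sum.inr cells : Sum String (List String))
              :: ts'.takeWhile (fun u => u.isLeft == (Sum.inr cells : Sum String (List String)).isLeft), x.isRight := by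
            intro x hx
            rcases hx with _ | hx
            · rfl
            · have h := List.mem_takeWhile_imp (by assumption :
                x ∈ ts'.takeWhile (fun u => u.isLeft == (Sum.inr cells : Sum String (List String)).isLeft))
              cases x with
              | inl a => simp at h
              | inr b => rfl
          rw [pvRowFold _ T [] c hallR]
          have hrest_shape :
              ts'.dropWhile (fun u => u.isLeft == (Sum.inr cells : Sum String (List String)).isLeft) = []
              ∨ ∃ s rest', ts'.dropWhile (fun u => u.isLeft == (Sum.inr cells : Sum String (List String)).isLeft)
                  = Sum.inl s :: rest' := by
            cases hh : ts'.dropWhile (fun u => u.isLeft == (Sum.inr cells : Sum String (List String)).isLeft) with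
            | nil => exact Or.inl rfl
            | cons u rest' =>
                have h := List.head?_dropWhile_not
                  (fun u : Sum String (List String) => u.isLeft == (Sum.inr cells : Sum String (List String)).isLeft) ts'
                rw [hh] at h
                simp only [List.head?_cons] at h
                cases u with
                | inl s' => exact Or.inr ⟨s', rest', rfl⟩
                | inr _ => simp at h
          have hvals :
              ([] : List (List String)) ++ ((Sum.inr cells
                :: ts'.takeWhile (fun u => u.isLeft == (Sum.inr cells : Sum String (List String)).isLeft)).filterMap
                (fun t => match t with | Sum.inr v => some v | _ => none)) ≠ [] := by
            simp
          rw [pvFlushShift _ T _ c hvals hrest_shape]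
          rw [List.foldl_cons]
          rw [show pvRunStep (T, c) (Sum.inr cells
                :: ts'.takeWhile (fun u => u.isLeft == (Sum.inr cells : Sum String (List String)).isLeft))
                = (T ++ [pvRenderB c ((Sum.inr cells
                    :: ts'.takeWhile (fun u => u.isLeft == (Sum.inr cells : Sum String (List String)).isLeft)).filterMap
                    (fun t => match t with | Sum.inr v => some v | _ => none))], c) from by
            simp only [pvRunStep]; rfl]
          rw [← pvRender_eq]
          have := ih (ts'.dropWhile (fun u => u.isLeft == (Sum.inr cells : Sum String (List String)).isLeft))
            (T ++ [pvTableHtmlA c ((Sum.inr cells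
              :: ts'.takeWhile (fun u => u.isLeft == (Sum.inr cells : Sum String (List String)).isLeft)).filterMap
              (fun t => match t with | Sum.inr v => some v | _ => none))]) c hrest_len
          simpa using this

-- ===== VERDICT (by name: the statement is the Claim_ definition above) =====
theorem read_xlsx_file_spec : Claim_equal_read_xlsx_file := by
  intro response_data _
  simp only [Spec_read_xlsx_file, read_xlsx_file, read_xlsx_file_alt]
  rw [pvStepA_token]
  have := pvMain ((((PySem.Dict.mk response_data).getD "sections" []).filterMap pvParse).length)
    (((PySem.Dict.mk response_data).getD "sections" []).filterMap pvParse) [] none le_rfl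
  simp only [pvFinish] at this
  rw [this]
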